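-- pv_equiv track=rewrite | github.com/qingchejun/ThinkTree | backend/app/core/ai_processor.py | _validate_mindmap_markdown
-- ===== SOURCE A (Python) =====
-- def _validate_mindmap_markdown(markdown: str) -> bool:
--     """验证Markdown内容是否为有效的思维导图格式"""
--     if not markdown or len(markdown.strip()) < 10:
--         return False
--
--     lines = markdown.split('\n')
--     has_title = False
--     has_content = False
--
--     for line in lines:
--         line = line.strip()
--         if not line:
--             continue
--
--         # 检查是否有主标题
--         if line.startswith('# '):
--             has_title = True
--
--         # 检查是否有内容（子标题或列表项）
--         if line.startswith('## ') or line.startswith('- ') or line.startswith('* '):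
--             has_content = True
--
--     return has_title and has_content
-- ===== SOURCE B (Python) =====
-- def _line_has_text(s, j):
--     """True iff some non-whitespace char occurs at index >= j before the next newline."""
--     n = len(s)
--     while j < n and s[j] != '\n':
--         if not s[j].isspace():
--             return True
--         j += 1
--     return False
--
--
-- def _validate_mindmap_markdown(markdown: str) -> bool:
--     if not markdown or len(markdown.strip()) < 10:
--         return False
--     # Single character scan over the string: at each line start skip intra-line
--     # whitespace, test the markers in place, then jump to the next line.
--     has_title = has_content = False
--     n = len(markdown)
--     i = 0
--     while i < n:
--         while i < n and markdown[i] != '\n' and markdown[i].isspace():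
--             i += 1
--         if markdown.startswith('# ', i) and _line_has_text(markdown, i + 2):
--             has_title = True
--         if ((markdown.startswith('## ', i) and _line_has_text(markdown, i + 3))
--                 or (markdown.startswith('- ', i) and _line_has_text(markdown, i + 2))
--                 or (markdown.startswith('* ', i) and _line_has_text(markdown, i + 2))):
--             has_content = True
--         if has_title and has_content:
--             return True
--         while i < n and markdown[i] != '\n':
--             i += 1
--         i += 1
--     return False
-- ===== Notes on version B (the rewrite author's own statement) =====
-- stated objective: alternative
-- what changed: Replaces the newline-split plus per-line strip/startswith loop with a single in-place character scan that skips line-leading whitespace, tests the markers at that position and requires trailing text on the line, never building intermediate line or stripped strings.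
import Mathlib
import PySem

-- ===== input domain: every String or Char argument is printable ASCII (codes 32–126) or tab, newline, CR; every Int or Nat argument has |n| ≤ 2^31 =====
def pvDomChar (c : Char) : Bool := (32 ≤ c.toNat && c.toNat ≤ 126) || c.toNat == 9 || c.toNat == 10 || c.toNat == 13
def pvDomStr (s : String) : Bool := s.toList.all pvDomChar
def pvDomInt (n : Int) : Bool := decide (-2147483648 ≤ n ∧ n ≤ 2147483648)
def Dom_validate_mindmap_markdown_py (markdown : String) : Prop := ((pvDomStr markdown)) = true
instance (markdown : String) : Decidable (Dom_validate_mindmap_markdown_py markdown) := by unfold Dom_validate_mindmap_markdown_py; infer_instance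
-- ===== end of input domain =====

-- B replaces split('\n') + per-line strip/startswith with one in-place character scan (alternative decomposition, same cost).


-- ===== PORT A =====
def validate_mindmap_markdown_py (markdown : String) : Bool :=
  let md := markdown.toList
  if md = [] ∨ (PySem.Chars.strip md).length < 10 then false
  else
    let lines := PySem.Chars.splitOn md ['\n']
    let r := lines.foldl (fun (st : Bool × Bool) line =>
      let l := PySem.Chars.strip line
      if l = [] then st
      else
        let hasTitle := if PySem.Chars.startswith l ['#', ' '] then true else st.1
        let hasContent :=
          if PySem.Chars.startswith l ['#', '#', ' '] || PySem.Chars.startswith l ['-', ' ']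
             || PySem.Chars.startswith l ['*', ' '] then true else st.2
        (hasTitle, hasContent)) (false, false)
    r.1 && r.2

-- ===== PORT B =====
-- _line_has_text(s, j): walk from j to the next newline looking for a non-whitespace char
def lineHasText : List Char → Bool
  | [] => false
  | c :: rest => if c = '\n' then false else if PySem.Chars.isspace c = false then true else lineHasText rest

-- the inner `while i < n and markdown[i] != '\n' and markdown[i].isspace(): i += 1`
def skipWs : List Char → List Char
  | [] => []
  | c :: rest => if c ≠ '\n' ∧ PySem.Chars.isspace c = true then skipWs rest else c :: rest

-- the inner `while i < n and markdown[i] != '\n': i += 1` followed by `i += 1`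
def skipLine : List Char → List Char
  | [] => []
  | c :: rest => if c = '\n' then rest else skipLine rest

-- the outer `while i < n` loop, carrying (has_title, has_content)
-- (the Nat argument is a totality fuel, one unit per consumed character; it never runs out for fuel = s.length)
def scanLoop : Nat → List Char → Bool → Bool → Bool
  | _, [], _, _ => false
  | 0, _ :: _, _, _ => false
  | fuel + 1, s@(_ :: _), hasTitle, hasContent =>
    let s1 := skipWs s
    let t := if PySem.Chars.startswith s1 ['#', ' '] && lineHasText (s1.drop 2) then true else hasTitle
    let c := if (PySem.Chars.startswith s1 ['#', '#', ' '] && lineHasText (s1.drop 3))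
                || (PySem.Chars.startswith s1 ['-', ' '] && lineHasText (s1.drop 2))
                || (PySem.Chars.startswith s1 ['*', ' '] && lineHasText (s1.drop 2)) then true else hasContent
    if t && c then true else scanLoop fuel (skipLine s1) t c

def validate_mindmap_markdown_py_alt (markdown : String) : Bool :=
  let md := markdown.toList
  if md = [] ∨ (PySem.Chars.strip md).length < 10 then false
  else scanLoop md.length md false false

-- ===== PRECONDITION & SPEC =====
def Spec_validate_mindmap_markdown_py (markdown : String) (out : Bool) : Prop := out = validate_mindmap_markdown_py_alt markdown
instance (markdown : String) (out : Bool) : Decidable (Spec_validate_mindmap_markdown_py markdown out) := by unfold Spec_validate_mindmap_markdown_py; infer_instance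

-- ===== CLAIM (what is proved, stated in full; the proofs are below) =====
def Claim_equal_validate_mindmap_markdown_py : Prop := ∀ (markdown : String), Dom_validate_mindmap_markdown_py markdown → Spec_validate_mindmap_markdown_py markdown (validate_mindmap_markdown_py markdown)

-- ===== LEMMAS AND PROOFS =====
-- pure version of splitOn on ['\n']
def pyLines : List Char → List (List Char)
  | [] => [[]]
  | c :: r => if c = '\n' then [] :: pyLines r else
      match pyLines r with
      | x :: xs => (c :: x) :: xs
      | [] => [[c]]

theorem pyLines_ne_nil (l : List Char) : pyLines l ≠ [] := by
  induction l with
  | nil => simp [pyLines]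
  | cons c r ih => simp only [pyLines]; split; · simp
                   cases h : pyLines r with
                   | nil => simp
                   | cons x xs => simp

theorem go_eq (fuel : Nat) : ∀ (l cur : List Char) (acc : List (List Char)), l.length < fuel →
    PySem.Chars.splitOn.go ['\n'] fuel l cur acc =
      acc.reverse ++ (match pyLines l with
        | x :: xs => (cur.reverse ++ x) :: xs
        | [] => []) := by
  induction fuel with
  | zero => intro l cur acc h; omega
  | succ fuel ih =>
    intro l cur acc h
    cases l with
    | nil => simp [PySem.Chars.splitOn.go, pyLines]
    | cons c rest =>
      rw [PySem.Chars.splitOn.go]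
      by_cases hc : c = '\n'
      · subst hc
        have hp : ['\n'].isPrefixOf ('\n' :: rest) = true := by simp [List.isPrefixOf]
        rw [if_pos hp]
        simp only [List.length_singleton, List.drop_succ_cons, List.drop_zero]
        rw [ih rest [] (cur.reverse :: acc) (by simpa using h)]
        simp only [pyLines]
        cases hr : pyLines rest with
        | nil => exact absurd hr (pyLines_ne_nil rest)
        | cons x xs => simp
      · have hp : ['\n'].isPrefixOf (c :: rest) = false := by
          simp [List.isPrefixOf]; intro hh; exact absurd hh.symm hc
        rw [if_neg (by simp [hp])]
        rw [ih rest (c :: cur) acc (by simpa using h)]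
        simp only [pyLines, if_neg hc]
        cases hr : pyLines rest with
        | nil => exact absurd hr (pyLines_ne_nil rest)
        | cons x xs => simp

theorem splitOn_eq_pyLines (md : List Char) : PySem.Chars.splitOn md ['\n'] = pyLines md := by
  rw [PySem.Chars.splitOn, go_eq _ _ _ _ (by omega)]
  cases h : pyLines md with
  | nil => exact absurd h (pyLines_ne_nil md)
  | cons x xs => simp


def pvT (l : List Char) : Bool := PySem.Chars.startswith (PySem.Chars.strip l) ['#', ' ']
def pvC (l : List Char) : Bool :=
  PySem.Chars.startswith (PySem.Chars.strip l) ['#', '#', ' ']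
  || PySem.Chars.startswith (PySem.Chars.strip l) ['-', ' ']
  || PySem.Chars.startswith (PySem.Chars.strip l) ['*', ' ']

theorem pyLines_no_nl (L : List Char) (h : '\n' ∉ L) : pyLines L = [L] := by
  induction L with
  | nil => rfl
  | cons c r ih =>
    simp only [List.mem_cons, not_or] at h
    rw [pyLines, if_neg (Ne.symm h.1), ih h.2]

theorem pyLines_append (L rest : List Char) (h : '\n' ∉ L) :
    pyLines (L ++ '\n' :: rest) = L :: pyLines rest := by
  induction L with
  | nil => simp [pyLines]
  | cons c r ih =>
    simp only [List.mem_cons, not_or] at h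
    simp only [List.cons_append, pyLines, if_neg (Ne.symm h.1), ih h.2]

-- A's loop body evaluates each line independently
theorem foldA (lines : List (List Char)) : ∀ t c : Bool,
    lines.foldl (fun (st : Bool × Bool) line =>
      let l := PySem.Chars.strip line
      if l = [] then st
      else
        let hasTitle := if PySem.Chars.startswith l ['#', ' '] then true else st.1
        let hasContent :=
          if PySem.Chars.startswith l ['#', '#', ' '] || PySem.Chars.startswith l ['-', ' ']
             || PySem.Chars.startswith l ['*', ' '] then true else st.2
        (hasTitle, hasContent)) (t, c) = (t || lines.any pvT, c || lines.any pvC) := by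
  induction lines with
  | nil => simp
  | cons line ls ih =>
    intro t c
    simp only [List.foldl_cons, List.any_cons]
    by_cases h : PySem.Chars.strip line = []
    · have h1 : pvT line = false := by simp [pvT, h, PySem.Chars.startswith]
      have h2 : pvC line = false := by simp [pvC, h, PySem.Chars.startswith]
      simp only [h, reduceIte]
      rw [ih]
      simp [h1, h2]
    · simp only [if_neg h, ih]
      have e1 : (if PySem.Chars.startswith (PySem.Chars.strip line) ['#', ' '] then true else t) = (t || pvT line) := by
        simp only [pvT]; cases PySem.Chars.startswith (PySem.Chars.strip line) ['#', ' '] <;> simp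
      have e2 : (if PySem.Chars.startswith (PySem.Chars.strip line) ['#', '#', ' '] || PySem.Chars.startswith (PySem.Chars.strip line) ['-', ' ']
             || PySem.Chars.startswith (PySem.Chars.strip line) ['*', ' '] then true else c) = (c || pvC line) := by
        simp only [pvC]
        cases PySem.Chars.startswith (PySem.Chars.strip line) ['#', '#', ' '] <;>
          cases PySem.Chars.startswith (PySem.Chars.strip line) ['-', ' '] <;>
          cases PySem.Chars.startswith (PySem.Chars.strip line) ['*', ' '] <;> simp
      rw [e1, e2]
      congr 1 <;> simp [Bool.or_assoc]

theorem skipWs_append (l tail : List Char) (hl : ∀ c ∈ l, c ≠ '\n')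
    (ht : tail = [] ∨ ∃ r, tail = '\n' :: r) :
    skipWs (l ++ tail) = l.dropWhile PySem.Chars.isspace ++ tail := by
  induction l with
  | nil =>
    rcases ht with h | ⟨r, h⟩ <;> subst h <;> simp [skipWs]
  | cons c rest ih =>
    have hc : c ≠ '\n' := hl c (List.mem_cons_self ..)
    by_cases hs : PySem.Chars.isspace c = true
    · rw [List.cons_append, skipWs, if_pos ⟨hc, hs⟩, ih (fun x hx => hl x (List.mem_cons_of_mem _ hx)),
        List.dropWhile_cons_of_pos hs]
    · rw [List.cons_append, skipWs, if_neg (by tauto),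
        List.dropWhile_cons_of_neg (by simpa using hs), List.cons_append]

theorem skipLine_append (l tail : List Char) (hl : ∀ c ∈ l, c ≠ '\n') :
    skipLine (l ++ tail) = skipLine tail := by
  induction l with
  | nil => rfl
  | cons c rest ih =>
    rw [List.cons_append, skipLine, if_neg (hl c (List.mem_cons_self ..)),
      ih (fun x hx => hl x (List.mem_cons_of_mem _ hx))]

theorem lineHasText_append (r tail : List Char) (hr : ∀ c ∈ r, c ≠ '\n')
    (ht : tail = [] ∨ ∃ rest, tail = '\n' :: rest) :
    lineHasText (r ++ tail) = r.any (fun c => !PySem.Chars.isspace c) := by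
  induction r with
  | nil => rcases ht with h | ⟨rest, h⟩ <;> subst h <;> simp [lineHasText]
  | cons c rest ih =>
    rw [List.cons_append, lineHasText, if_neg (hr c (List.mem_cons_self ..))]
    by_cases hs : PySem.Chars.isspace c = false
    · simp [hs]
    · simp only [Bool.not_eq_false] at hs
      rw [if_neg (by simp [hs]), ih (fun x hx => hr x (List.mem_cons_of_mem _ hx))]
      simp [hs]

theorem prefix_boundary (m : List Char) (hm : '\n' ∉ m) :
    ∀ (l tail : List Char), (ht : tail = [] ∨ ∃ rest, tail = '\n' :: rest) →
    m.isPrefixOf (l ++ tail) = m.isPrefixOf l := by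
  induction m with
  | nil => intro l tail ht; simp [List.isPrefixOf]
  | cons a m' ih =>
    intro l tail ht
    simp only [List.mem_cons, not_or] at hm
    cases l with
    | nil =>
      rcases ht with h | ⟨rest, h⟩ <;> subst h
      · rfl
      · simp [List.isPrefixOf, Ne.symm hm.1]
    | cons b l' =>
      simp only [List.cons_append, List.isPrefixOf]
      rw [ih hm.2 l' tail ht]

theorem rstrip_prefix (l : List Char) : PySem.Chars.rstrip l <+: l := by
  rw [PySem.Chars.rstrip]
  have h := List.dropWhile_suffix (l := l.reverse) (p := PySem.Chars.isspace)
  have := List.reverse_prefix.mpr (by simpa using h)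
  simpa using this

theorem rstrip_append_of_any (a b : List Char) (hb : b.any (fun c => !PySem.Chars.isspace c) = true) :
    PySem.Chars.rstrip (a ++ b) = a ++ PySem.Chars.rstrip b := by
  rw [PySem.Chars.rstrip, PySem.Chars.rstrip, List.reverse_append, List.dropWhile_append]
  have hne : ¬(List.dropWhile PySem.Chars.isspace b.reverse).isEmpty = true := by
    simp only [List.isEmpty_iff, List.dropWhile_eq_nil_iff]
    intro hall
    obtain ⟨c, hc, hcs⟩ := List.any_eq_true.mp hb
    exact absurd (hall c (by simpa using hc)) (by simpa using hcs)
  rw [if_neg hne, List.reverse_append, List.reverse_reverse]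

theorem rstrip_append_all_space (a b : List Char) (hb : b.any (fun c => !PySem.Chars.isspace c) = false) :
    PySem.Chars.rstrip (a ++ b) = PySem.Chars.rstrip a := by
  rw [PySem.Chars.rstrip, PySem.Chars.rstrip, List.reverse_append, List.dropWhile_append]
  have he : (List.dropWhile PySem.Chars.isspace b.reverse).isEmpty = true := by
    simp only [List.isEmpty_iff, List.dropWhile_eq_nil_iff]
    intro c hc
    simp only [List.any_eq_false] at hb
    simpa using hb c (by simpa using hc)
  rw [if_pos he]


theorem markerCore (ms l' tail : List Char)
    (hl' : ∀ c ∈ l', c ≠ '\n')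
    (ht : tail = [] ∨ ∃ rest, tail = '\n' :: rest) :
    ((ms ++ [' ']).isPrefixOf l' && lineHasText ((l' ++ tail).drop (ms ++ [' ']).length))
    = (ms ++ [' ']).isPrefixOf (PySem.Chars.rstrip l') := by
  have hsp : PySem.Chars.isspace ' ' = true := by decide
  by_cases hp : (ms ++ [' ']).isPrefixOf l' = true
  · obtain ⟨r, hr⟩ := List.isPrefixOf_iff_prefix.mp hp
    rw [hp, Bool.true_and, ← hr, List.append_assoc, List.drop_left]
    have hrnl : ∀ c ∈ r, c ≠ '\n' := fun c hc => hl' c (by rw [← hr]; exact List.mem_append_right _ hc)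
    rw [lineHasText_append r tail hrnl ht]
    by_cases ha : r.any (fun c => !PySem.Chars.isspace c) = true
    · rw [ha, rstrip_append_of_any _ _ ha]
      exact (List.isPrefixOf_iff_prefix.mpr ⟨_, rfl⟩).symm
    · have ha' : r.any (fun c => !PySem.Chars.isspace c) = false := by simpa using ha
      have hb : ([' '] ++ r).any (fun c => !PySem.Chars.isspace c) = false := by
        simp [ha', hsp]
      rw [ha', List.append_assoc, rstrip_append_all_space ms ([' '] ++ r) hb]
      have hlen := (rstrip_prefix ms).length_le
      symm
      rw [Bool.eq_false_iff]
      intro h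
      have := (List.isPrefixOf_iff_prefix.mp h).length_le
      simp only [List.length_append, List.length_singleton] at this
      omega
  · simp only [Bool.not_eq_true] at hp
    rw [hp, Bool.false_and]
    by_cases hq : (ms ++ [' ']).isPrefixOf (PySem.Chars.rstrip l') = true
    · have h1 : ms ++ [' '] <+: l' :=
        (List.isPrefixOf_iff_prefix.mp hq).trans (rstrip_prefix l')
      rw [List.isPrefixOf_iff_prefix.mpr h1] at hp
      exact absurd hp (by simp)
    · simp only [Bool.not_eq_true] at hq
      rw [hq]

theorem markerEval (ms l tail : List Char)
    (hmw : ∀ c ∈ ms, PySem.Chars.isspace c = false)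
    (hl : ∀ c ∈ l, c ≠ '\n')
    (ht : tail = [] ∨ ∃ rest, tail = '\n' :: rest) :
    (PySem.Chars.startswith (skipWs (l ++ tail)) (ms ++ [' ']) &&
      lineHasText ((skipWs (l ++ tail)).drop (ms ++ [' ']).length))
    = PySem.Chars.startswith (PySem.Chars.strip l) (ms ++ [' ']) := by
  have hnl : PySem.Chars.isspace '\n' = true := by decide
  have hmnl : '\n' ∉ ms ++ [' '] := by
    simp only [List.mem_append, List.mem_singleton, not_or]
    exact ⟨fun h => by simpa [hnl] using hmw _ h, by decide⟩
  have hstrip : PySem.Chars.strip l = PySem.Chars.rstrip (l.dropWhile PySem.Chars.isspace) := by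
    rw [PySem.Chars.strip, PySem.Chars.lstrip]
  have hl' : ∀ c ∈ l.dropWhile PySem.Chars.isspace, c ≠ '\n' :=
    fun c hc => hl c ((List.dropWhile_sublist _).mem hc)
  rw [skipWs_append l tail hl ht, hstrip]
  simp only [PySem.Chars.startswith]
  rw [prefix_boundary (ms ++ [' ']) hmnl _ tail ht]
  exact markerCore ms _ tail hl' ht

theorem dropWhile_head_false {α : Type} (p : α → Bool) :
    ∀ (l : List α) (b : α) (r : List α), l.dropWhile p = b :: r → p b = false := by
  intro l
  induction l with
  | nil => intro b r h; simp [List.dropWhile] at h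
  | cons c rest ih =>
    intro b r h
    rw [List.dropWhile_cons] at h
    by_cases hc : p c = true
    · rw [if_pos hc] at h; exact ih b r h
    · rw [if_neg hc] at h
      cases h
      simpa using hc

theorem ifOr (T t : Bool) : (if T then true else t) = (T || t) := by
  cases T <;> simp

theorem boolStep (T C t c AT AC : Bool) :
    ((((T || t)) || AT) && (((C || c)) || AC)) = ((t || (T || AT)) && (c || (C || AC))) := by
  cases T <;> cases C <;> cases t <;> cases c <;> (revert AT AC; decide)

theorem boolTrue (T C t c AT AC : Bool) (hb : ((T || t) && (C || c)) = true) :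
    ((t || (T || AT)) && (c || (C || AC))) = true := by
  cases T <;> cases C <;> cases t <;> cases c <;> (revert hb; revert AT AC; decide)

set_option maxRecDepth 8192 in
theorem scan_eval : ∀ (fuel : Nat) (md : List Char) (t c : Bool), md.length ≤ fuel →
    (t && c) = false →
    scanLoop fuel md t c = ((t || (pyLines md).any pvT) && (c || (pyLines md).any pvC)) := by
  intro fuel
  induction fuel with
  | zero =>
    intro md t c hlen hb
    have : md = [] := List.eq_nil_of_length_eq_zero (by omega)
    subst this
    simp [scanLoop, pyLines, pvT, pvC, PySem.Chars.strip, PySem.Chars.lstrip, PySem.Chars.rstrip,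
      PySem.Chars.startswith, hb]
  | succ f ih =>
    intro md t c hlen hb
    cases md with
    | nil =>
      simp [scanLoop, pyLines, pvT, pvC, PySem.Chars.strip, PySem.Chars.lstrip, PySem.Chars.rstrip,
        PySem.Chars.startswith, hb]
    | cons a m' =>
      have hdec : a :: m' = List.takeWhile (fun ch => !(ch == '\n')) (a :: m')
          ++ List.dropWhile (fun ch => !(ch == '\n')) (a :: m') :=
        (List.takeWhile_append_dropWhile).symm
      set L := List.takeWhile (fun ch => !(ch == '\n')) (a :: m') with hL
      set tail := List.dropWhile (fun ch => !(ch == '\n')) (a :: m') with htail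
      have hl : ∀ ch ∈ L, ch ≠ '\n' := by
        intro ch hch
        have := List.mem_takeWhile_imp hch
        simpa using this
      have ht : tail = [] ∨ ∃ rest, tail = '\n' :: rest := by
        cases htl : tail with
        | nil => exact Or.inl rfl
        | cons b r =>
          right
          have := dropWhile_head_false (fun ch => !(ch == '\n')) (a :: m') b r (by rw [← htail, htl])
          simp only [Bool.not_eq_false', beq_iff_eq] at this
          exact ⟨r, by rw [this]⟩
      have e1 : (PySem.Chars.startswith (skipWs (L ++ tail)) ['#', ' '] &&
          lineHasText ((skipWs (L ++ tail)).drop 2)) = PySem.Chars.startswith (PySem.Chars.strip L) ['#', ' '] := by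
        simpa using markerEval ['#'] L tail (by intro ch hch; fin_cases hch; decide) hl ht
      have e2 : (PySem.Chars.startswith (skipWs (L ++ tail)) ['#', '#', ' '] &&
          lineHasText ((skipWs (L ++ tail)).drop 3)) = PySem.Chars.startswith (PySem.Chars.strip L) ['#', '#', ' '] := by
        simpa using markerEval ['#', '#'] L tail (by intro ch hch; fin_cases hch <;> decide) hl ht
      have e3 : (PySem.Chars.startswith (skipWs (L ++ tail)) ['-', ' '] &&
          lineHasText ((skipWs (L ++ tail)).drop 2)) = PySem.Chars.startswith (PySem.Chars.strip L) ['-', ' '] := by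
        simpa using markerEval ['-'] L tail (by intro ch hch; fin_cases hch; decide) hl ht
      have e4 : (PySem.Chars.startswith (skipWs (L ++ tail)) ['*', ' '] &&
          lineHasText ((skipWs (L ++ tail)).drop 2)) = PySem.Chars.startswith (PySem.Chars.strip L) ['*', ' '] := by
        simpa using markerEval ['*'] L tail (by intro ch hch; fin_cases hch; decide) hl ht
      have hskip : skipLine (skipWs (L ++ tail)) = skipLine tail := by
        rw [skipWs_append L tail hl ht,
          skipLine_append _ tail (fun ch hch => hl ch ((List.dropWhile_sublist _).mem hch))]
      rw [scanLoop]
      rw [hdec, e1, e2, e3, e4, hskip,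
        ifOr (PySem.Chars.startswith (PySem.Chars.strip L) ['#', ' ']) t,
        ifOr (PySem.Chars.startswith (PySem.Chars.strip L) ['#', '#', ' '] ||
              PySem.Chars.startswith (PySem.Chars.strip L) ['-', ' '] ||
              PySem.Chars.startswith (PySem.Chars.strip L) ['*', ' ']) c]
      rcases ht with htl | ⟨rest, htl⟩
      · rw [htl, List.append_nil]
        have hnl : '\n' ∉ L := fun h => hl '\n' h rfl
        rw [pyLines_no_nl L hnl]
        simp only [skipLine, scanLoop, List.any_cons, List.any_nil, pvT, pvC, Bool.or_false]
        cases PySem.Chars.startswith (PySem.Chars.strip L) ['#', ' '] <;>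
          cases PySem.Chars.startswith (PySem.Chars.strip L) ['#', '#', ' '] <;>
          cases PySem.Chars.startswith (PySem.Chars.strip L) ['-', ' '] <;>
          cases PySem.Chars.startswith (PySem.Chars.strip L) ['*', ' '] <;>
          cases t <;> cases c <;> rfl
      · rw [htl]
        rw [show skipLine ('\n' :: rest) = rest from by simp [skipLine]]
        rw [pyLines_append L rest (fun h => hl '\n' h rfl)]
        simp only [List.any_cons, pvT, pvC]
        have hlen' : rest.length ≤ f := by
          have h1 : (a :: m').length = L.length + tail.length := by rw [hdec, List.length_append]
          rw [htl] at h1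
          simp only [List.length_cons] at h1 hlen
          omega
        by_cases hcond : (((PySem.Chars.startswith (PySem.Chars.strip L) ['#', ' '] || t) &&
            ((PySem.Chars.startswith (PySem.Chars.strip L) ['#', '#', ' '] ||
              PySem.Chars.startswith (PySem.Chars.strip L) ['-', ' '] ||
              PySem.Chars.startswith (PySem.Chars.strip L) ['*', ' ']) || c)) = true)
        · rw [if_pos hcond]
          exact (boolTrue _ _ _ _ _ _ hcond).symm
        · rw [if_neg hcond]
          have hb' : ((PySem.Chars.startswith (PySem.Chars.strip L) ['#', ' '] || t) &&
            ((PySem.Chars.startswith (PySem.Chars.strip L) ['#', '#', ' '] ||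
              PySem.Chars.startswith (PySem.Chars.strip L) ['-', ' '] ||
              PySem.Chars.startswith (PySem.Chars.strip L) ['*', ' ']) || c)) = false := by
            simpa using hcond
          rw [ih rest _ _ hlen' hb']
          exact boolStep _ _ _ _ _ _


-- ===== VERDICT (by name: the statement is the Claim_ definition above) =====
theorem validate_mindmap_markdown_py_spec : Claim_equal_validate_mindmap_markdown_py := by
  intro markdown _
  unfold Spec_validate_mindmap_markdown_py
  simp only [validate_mindmap_markdown_py, validate_mindmap_markdown_py_alt]
  by_cases h : markdown.toList = [] ∨ (PySem.Chars.strip markdown.toList).length < 10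
  · rw [if_pos h, if_pos h]
  · rw [if_neg h, if_neg h]
    rw [splitOn_eq_pyLines, foldA, scan_eval markdown.toList.length markdown.toList false false le_rfl rfl]
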